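-- pv_equiv track=rewrite | github.com/yoyokity/VapourSynth-Batch | src/vpy/extract_chapter.py | _parse_ffmetadata_chapters
-- ===== SOURCE A (Python) =====
-- def _parse_ffmetadata_chapters(metadata_text: str):
--     """解析 ffmetadata 中的章节信息"""
--     chapters = []
--     chapter = None
--
--     for raw_line in metadata_text.splitlines():
--         line = raw_line.strip()
--         if not line:
--             continue
--
--         if line == '[CHAPTER]':
--             if chapter:
--                 chapters.append(chapter)
--             chapter = {
--                 'timebase': '1/1000',
--                 'start': '0',
--                 'title': ''
--             }
--             continue
--
--         if chapter is None or '=' not in line: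
--             continue
--
--         key, value = line.split('=', 1)
--         if key == 'TIMEBASE':
--             chapter['timebase'] = value
--         elif key == 'START':
--             chapter['start'] = value
--         elif key == 'title':
--             chapter['title'] = value
--
--     if chapter:
--         chapters.append(chapter)
--
--     return chapters
-- ===== SOURCE B (Python) =====
-- _FIELD = {'TIMEBASE': 'timebase', 'START': 'start', 'title': 'title'}
--
--
-- def _block_to_chapter(block):
--     """Build one chapter dict from the stripped lines of one [CHAPTER] block."""
--     chapter = {'timebase': '1/1000', 'start': '0', 'title': ''}
--     for line in block:
--         if '=' not in line:
--             continue
--         key, value = line.split('=', 1)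
--         field = _FIELD.get(key)
--         if field is not None:
--             chapter[field] = value
--     return chapter
--
--
-- def _parse_ffmetadata_chapters(metadata_text: str):
--     # Phase 1: group the stripped lines into blocks, one per '[CHAPTER]' marker,
--     # dropping everything before the first marker.
--     blocks = []
--     for raw_line in metadata_text.splitlines():
--         line = raw_line.strip()
--         if line == '[CHAPTER]':
--             blocks.append([])
--         elif blocks:
--             blocks[-1].append(line)
--     # Phase 2: map each block to its chapter dict.
--     return [_block_to_chapter(block) for block in blocks]
-- ===== Notes on version B (the rewrite author's own statement) =====
-- stated objective: simpler
-- what changed: A's single-pass state machine (current-chapter dict mutated per line, flushed at each marker and at the end) is replaced by a two-phase pipeline: group the stripped lines into per-[CHAPTER] blocks, then map each block to its chapter dict using a key-translation table instead of an if/elif chain.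
import Mathlib
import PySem

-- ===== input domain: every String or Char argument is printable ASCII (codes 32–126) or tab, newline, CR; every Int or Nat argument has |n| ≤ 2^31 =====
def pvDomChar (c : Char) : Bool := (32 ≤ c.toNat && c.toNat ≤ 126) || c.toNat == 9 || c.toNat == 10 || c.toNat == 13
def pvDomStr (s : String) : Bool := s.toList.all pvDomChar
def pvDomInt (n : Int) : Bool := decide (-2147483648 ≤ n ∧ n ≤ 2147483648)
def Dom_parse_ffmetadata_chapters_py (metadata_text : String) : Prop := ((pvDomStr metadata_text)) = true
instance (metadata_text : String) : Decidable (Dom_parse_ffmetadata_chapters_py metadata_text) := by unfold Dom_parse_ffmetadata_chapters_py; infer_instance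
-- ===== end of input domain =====

-- B replaces A's incremental state machine (current-chapter dict mutated line by line, flushed at each
-- marker and at the end) by a two-phase pipeline: group the stripped lines into blocks at each
-- '[CHAPTER]' marker, then map each block to its chapter dict via a key-translation table (objective: simpler).

-- ===== PORT A =====
-- A's loop state: (chapters so far, current chapter dict or None)
def pvAStep (st : List (PySem.Dict String String) × Option (PySem.Dict String String))
    (raw_line : String) :
    List (PySem.Dict String String) × Option (PySem.Dict String String) :=
  let line := PySem.Str.strip raw_line
  if line = "" then st
  else if line = "[CHAPTER]" then
    ((match st.2 with
      | some c => if c.size ≠ 0 then st.1 ++ [c] else st.1   -- 'if chapter:' (dict truthiness)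
      | none => st.1),
     some (PySem.Dict.ofList [("timebase", "1/1000"), ("start", "0"), ("title", "")]))
  else
    match st.2 with                                           -- 'if chapter is None … : continue'
    | none => st
    | some c =>
      if PySem.Str.isIn "=" line = false then st              -- '… or "=" not in line: continue'
      else
        match PySem.Str.splitMax? line "=" 1 with             -- key, value = line.split('=', 1)
        | some (key :: value :: _) =>
            (st.1,
             some (if key = "TIMEBASE" then c.insert "timebase" value
                   else if key = "START" then c.insert "start" value
                   else if key = "title" then c.insert "title" value
                   else c))
        | _ => st                                             -- unreachable: '=' in line gives 2 parts

def parse_ffmetadata_chapters_py (metadata_text : String) : List (List (String × String)) :=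
  let st := (PySem.Str.splitlines metadata_text).foldl pvAStep ([], none)
  let chapters :=
    match st.2 with
    | some c => if c.size ≠ 0 then st.1 ++ [c] else st.1      -- final 'if chapter:' flush
    | none => st.1
  chapters.map (fun d => d.items)                             -- dict → assoc list (type convention)

-- ===== PORT B =====
def pvFieldMap : PySem.Dict String String :=
  PySem.Dict.ofList [("TIMEBASE", "timebase"), ("START", "start"), ("title", "title")]

-- body of the loop in _block_to_chapter
def pvFieldStep (chapter : PySem.Dict String String) (line : String) : PySem.Dict String String :=
  if PySem.Str.isIn "=" line = false then chapter             -- "if '=' not in line: continue"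
  else
    match PySem.Str.splitMax? line "=" 1 with                 -- key, value = line.split('=', 1)
    | some (key :: value :: _) =>
        match pvFieldMap.get? key with                        -- field = _FIELD.get(key)
        | some field => chapter.insert field value            -- if field is not None: …
        | none => chapter
    | _ => chapter                                            -- unreachable: '=' in line gives 2 parts

def pvBlockToChapter (block : List String) : PySem.Dict String String :=
  block.foldl pvFieldStep
    (PySem.Dict.ofList [("timebase", "1/1000"), ("start", "0"), ("title", "")])

-- phase-1 step: start a new block at a marker, else append to the last block (if any)
def pvBStep (blocks : List (List String)) (raw_line : String) : List (List String) :=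
  let line := PySem.Str.strip raw_line
  if line = "[CHAPTER]" then blocks ++ [[]]
  else
    match blocks.getLast? with                                -- 'elif blocks: blocks[-1].append(line)'
    | some b => blocks.dropLast ++ [b ++ [line]]
    | none => blocks

def parse_ffmetadata_chapters_py_alt (metadata_text : String) : List (List (String × String)) :=
  let blocks := (PySem.Str.splitlines metadata_text).foldl pvBStep []
  blocks.map (fun block => (pvBlockToChapter block).items)

-- ===== PRECONDITION & SPEC =====
def Spec_parse_ffmetadata_chapters_py (metadata_text : String) (out : List (List (String × String))) : Prop := out = parse_ffmetadata_chapters_py_alt metadata_text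
instance (metadata_text : String) (out : List (List (String × String))) : Decidable (Spec_parse_ffmetadata_chapters_py metadata_text out) := by unfold Spec_parse_ffmetadata_chapters_py; infer_instance

-- ===== CLAIM (what is proved, stated in full; the proofs are below) =====
def Claim_equal_parse_ffmetadata_chapters_py : Prop := ∀ (metadata_text : String), Dom_parse_ffmetadata_chapters_py metadata_text → Spec_parse_ffmetadata_chapters_py metadata_text (parse_ffmetadata_chapters_py metadata_text)

-- ===== LEMMAS AND PROOFS =====

-- relation between A's loop state and B's block list
def pvRel (st : List (PySem.Dict String String) × Option (PySem.Dict String String))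
    (blocks : List (List String)) : Prop :=
  (blocks = [] ∧ st.1 = [] ∧ st.2 = none) ∨
  (∃ bs b, blocks = bs ++ [b] ∧ st.1 = bs.map pvBlockToChapter ∧ st.2 = some (pvBlockToChapter b))

lemma pvFieldStep_contains (d : PySem.Dict String String) (line : String)
    (h : d.contains "timebase" = true) : (pvFieldStep d line).contains "timebase" = true := by
  unfold pvFieldStep
  split_ifs
  · exact h
  · split
    · split
      · simp [PySem.Dict.contains_insert, h]
      · exact h
    · exact h

lemma pvBlockToChapter_contains (block : List String) :
    (pvBlockToChapter block).contains "timebase" = true := by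
  unfold pvBlockToChapter
  generalize hd : (PySem.Dict.ofList [("timebase", "1/1000"), ("start", "0"), ("title", "")] : PySem.Dict String String) = d
  have hc : d.contains "timebase" = true := by rw [← hd]; decide
  clear hd
  induction block generalizing d with
  | nil => exact hc
  | cons l ls ih => exact ih _ (pvFieldStep_contains d l hc)

lemma pvContains_size_ne {d : PySem.Dict String String}
    (h : d.contains "timebase" = true) : d.size ≠ 0 := by
  cases d with
  | mk items =>
    cases items with
    | nil => simp [PySem.Dict.contains] at h
    | cons p rest => simp [PySem.Dict.size]

lemma pvBlockToChapter_append (b : List String) (line : String) :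
    pvBlockToChapter (b ++ [line]) = pvFieldStep (pvBlockToChapter b) line := by
  simp [pvBlockToChapter, List.foldl_append]

lemma pvFieldMap_get (key : String) :
    pvFieldMap.get? key =
      if key = "TIMEBASE" then some "timebase"
      else if key = "START" then some "start"
      else if key = "title" then some "title" else none := by
  rw [show pvFieldMap = PySem.Dict.mk [("TIMEBASE", "timebase"), ("START", "start"), ("title", "title")] from rfl]
  simp only [PySem.Dict.get?_mk_cons]
  have h0 : ∀ a b : String, (a == b) = (b == a) := fun a b => by
    by_cases h : a = b <;> simp [h, Ne.symm]
  rw [h0 "TIMEBASE" key, h0 "START" key, h0 "title" key]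
  split_ifs with h1 h2 h3 <;> simp_all [PySem.Dict.get?]

-- A's KEY=VALUE if/elif chain computes exactly B's table-driven update
lemma pvUpd_eq (c : PySem.Dict String String) (key value : String) :
    (if key = "TIMEBASE" then c.insert "timebase" value
     else if key = "START" then c.insert "start" value
     else if key = "title" then c.insert "title" value
     else c) =
    (match pvFieldMap.get? key with
     | some field => c.insert field value
     | none => c) := by
  rw [pvFieldMap_get]
  split_ifs <;> rfl

lemma pvFieldStep_blank (d : PySem.Dict String String) : pvFieldStep d "" = d := by
  unfold pvFieldStep
  rw [if_pos (by decide : PySem.Str.isIn "=" "" = false)]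

lemma pvStep_rel (st : List (PySem.Dict String String) × Option (PySem.Dict String String))
    (blocks : List (List String)) (raw : String) (h : pvRel st blocks) :
    pvRel (pvAStep st raw) (pvBStep blocks raw) := by
  obtain ⟨cs, ch⟩ := st
  simp only [pvAStep, pvBStep]
  generalize PySem.Str.strip raw = l
  by_cases h1 : l = "[CHAPTER]"
  · -- marker line: A flushes and restarts, B opens a new block
    subst h1
    rw [if_neg (by decide : ¬ ("[CHAPTER]" : String) = ""), if_pos rfl, if_pos rfl]
    rcases h with ⟨hb, hs1, hs2⟩ | ⟨bs, b, hb, hs1, hs2⟩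
    · simp only at hs1 hs2; subst hb hs1 hs2
      exact Or.inr ⟨[], [], rfl, rfl, rfl⟩
    · simp only at hs1 hs2; subst hb hs1 hs2
      refine Or.inr ⟨bs ++ [b], [], rfl, ?_, rfl⟩
      show (if (pvBlockToChapter b).size ≠ 0 then _ ++ [pvBlockToChapter b] else _) = _
      rw [if_pos (pvContains_size_ne (pvBlockToChapter_contains b))]
      simp
  · rw [if_neg h1, if_neg h1]
    by_cases h0 : l = ""
    · -- blank line: A skips it, B appends "" to the open block (a no-op for the chapter)
      subst h0
      rw [if_pos rfl]
      rcases h with ⟨hb, hs1, hs2⟩ | ⟨bs, b, hb, hs1, hs2⟩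
      · simp only at hs1 hs2; subst hb hs1 hs2
        exact Or.inl ⟨rfl, rfl, rfl⟩
      · simp only at hs1 hs2; subst hb hs1 hs2
        rw [List.getLast?_concat, List.dropLast_concat]
        exact Or.inr ⟨bs, b ++ [""], rfl, rfl, by
          rw [pvBlockToChapter_append, pvFieldStep_blank]⟩
    · rw [if_neg h0]
      rcases h with ⟨hb, hs1, hs2⟩ | ⟨bs, b, hb, hs1, hs2⟩
      · simp only at hs1 hs2; subst hb hs1 hs2
        exact Or.inl ⟨rfl, rfl, rfl⟩
      · simp only at hs1 hs2; subst hb hs1 hs2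
        rw [List.getLast?_concat, List.dropLast_concat]
        refine Or.inr ⟨bs, b ++ [l], rfl, ?_, ?_⟩
        · -- first component: A keeps its chapters list
          dsimp only
          by_cases hIn : PySem.Str.isIn "=" l = false
          · rw [if_pos hIn]
          · rw [if_neg hIn]
            cases hsp : PySem.Str.splitMax? l "=" 1 with
            | none => rfl
            | some parts =>
              match parts with
              | [] => rfl
              | [k] => rfl
              | k :: v :: rest => rfl
        · -- second component: A's updated chapter is B's chapter of the grown block
          dsimp only
          rw [pvBlockToChapter_append]
          unfold pvFieldStep
          by_cases hIn : PySem.Str.isIn "=" l = false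
          · rw [if_pos hIn, if_pos hIn]
          · rw [if_neg hIn, if_neg hIn]
            cases hsp : PySem.Str.splitMax? l "=" 1 with
            | none => rfl
            | some parts =>
              match parts with
              | [] => rfl
              | [k] => rfl
              | k :: v :: rest => exact congrArg some (pvUpd_eq _ k v)

lemma pvFold_rel (ls : List String)
    (st : List (PySem.Dict String String) × Option (PySem.Dict String String))
    (blocks : List (List String)) (h : pvRel st blocks) :
    pvRel (ls.foldl pvAStep st) (ls.foldl pvBStep blocks) := by
  induction ls generalizing st blocks with
  | nil => exact h
  | cons l ls ih => exact ih _ _ (pvStep_rel _ _ _ h)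

-- ===== VERDICT (by name: the statement is the Claim_ definition above) =====
theorem parse_ffmetadata_chapters_py_spec : Claim_equal_parse_ffmetadata_chapters_py := by
  intro s _
  unfold Spec_parse_ffmetadata_chapters_py
  unfold parse_ffmetadata_chapters_py parse_ffmetadata_chapters_py_alt
  have h := pvFold_rel (PySem.Str.splitlines s) ([], none) [] (Or.inl ⟨rfl, rfl, rfl⟩)
  rcases h with ⟨hb, h1, h2⟩ | ⟨bs, b, hb, h1, h2⟩
  · simp [hb, h1, h2]
  · simp [hb, h1, h2, pvContains_size_ne (pvBlockToChapter_contains b)]
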